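-- pv_equiv track=rewrite | github.com/hsalis/ViennaRNA | tests/perf/python_viennarna_compare.py | synthetic_sequence
-- ===== SOURCE A (Python) =====
-- def synthetic_sequence(length: int, seed: int) -> str:
--     alphabet = "ACGU"
--     state = seed ^ length
--     out = []
--     for _ in range(length):
--         state = (state * 1664525 + 1013904223) & 0xFFFFFFFF
--         out.append(alphabet[(state >> 24) & 0x3])
--     return "".join(out)
-- ===== SOURCE B (Python) =====
-- def synthetic_sequence(length: int, seed: int) -> str:
--     # Closed form for the k-th LCG state: a^k*s0 + c*(a^k-1)/(a-1) (mod 2^32),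
--     # each character computed independently from one modular exponentiation
--     # (modulus (a-1)*2^32 recovers the geometric sum exactly, and reduces to a^k mod 2^32).
--     M = 1 << 32
--     a = 1664525
--     c = 1013904223
--     s0 = seed ^ length
--
--     def state(k):
--         r = pow(a, k, (a - 1) * M)
--         return ((r % M) * s0 + c * ((r - 1) // (a - 1))) % M
--
--     return "".join("ACGU"[(state(k + 1) >> 24) & 0x3] for k in range(length))
-- ===== Notes on version B (the rewrite author's own statement) =====
-- stated objective: alternative
-- what changed: Replaces the sequential LCG loop with a per-index closed form: the k-th state is computed independently as a^k*s0 + c*(a^k-1)/(a-1) mod 2^32, with the geometric sum obtained exactly via pow(a, k, (a-1)*2^32), then mapped to a character.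
import Mathlib
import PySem

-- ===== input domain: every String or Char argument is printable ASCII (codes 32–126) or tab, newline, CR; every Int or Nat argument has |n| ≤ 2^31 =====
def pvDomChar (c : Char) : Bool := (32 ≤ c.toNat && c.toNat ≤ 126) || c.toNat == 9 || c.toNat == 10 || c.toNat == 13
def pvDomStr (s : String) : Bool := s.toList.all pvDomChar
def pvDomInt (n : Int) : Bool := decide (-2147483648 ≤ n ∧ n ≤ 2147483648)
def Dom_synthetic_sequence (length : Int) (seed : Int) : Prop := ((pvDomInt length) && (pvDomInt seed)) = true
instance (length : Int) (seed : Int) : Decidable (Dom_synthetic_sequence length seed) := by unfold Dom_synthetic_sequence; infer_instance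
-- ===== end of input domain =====

-- B replaces the sequential LCG loop by a per-index closed form of the k-th LCG state
-- (a^k*s0 + c*(a^k-1)/(a-1) mod 2^32, geometric sum recovered exactly from pow(a,k,(a-1)*2^32));
-- objective: alternative (not faster). 'A' is only a totality default for the in-range alphabet index.

-- ===== PORT A =====
def synthetic_sequence (length : Int) (seed : Int) : String :=
  let alphabet : List Char := ['A', 'C', 'G', 'U']
  let r := (PySem.List.pyRange 0 length).foldl
    (fun (st : Int × List Char) (_ : Int) =>
      let s := PySem.Int.band (st.1 * 1664525 + 1013904223) 4294967295
      (s, st.2 ++ [PySem.List.pyGetD alphabet (PySem.Int.band (s >>> (24 : Nat)) 3) 'A']))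
    (PySem.Int.bxor seed length, [])
  String.ofList r.2

-- ===== PORT B =====
def synthetic_sequence_alt (length : Int) (seed : Int) : String :=
  let M : Int := 4294967296
  let a : Int := 1664525
  let c : Int := 1013904223
  let s0 : Int := PySem.Int.bxor seed length
  let state : Int → Int := fun k =>
    let r := PySem.Int.powMod a k.toNat ((a - 1) * M)
    PySem.Int.mod (PySem.Int.mod r M * s0 + c * PySem.Int.floordiv (r - 1) (a - 1)) M
  String.ofList ((PySem.List.pyRange 0 length).map
    (fun k => PySem.List.pyGetD ['A', 'C', 'G', 'U']
      (PySem.Int.band (state (k + 1) >>> (24 : Nat)) 3) 'A'))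

-- ===== PRECONDITION & SPEC =====
def Spec_synthetic_sequence (length : Int) (seed : Int) (out : String) : Prop := out = synthetic_sequence_alt length seed
instance (length : Int) (seed : Int) (out : String) : Decidable (Spec_synthetic_sequence length seed out) := by unfold Spec_synthetic_sequence; infer_instance

-- ===== CLAIM (what is proved, stated in full; the proofs are below) =====
def Claim_equal_synthetic_sequence : Prop := ∀ (length : Int) (seed : Int), Dom_synthetic_sequence length seed → Spec_synthetic_sequence length seed (synthetic_sequence length seed)

-- ===== LEMMAS AND PROOFS =====

-- the LCG step of A, and the state-to-character map (proof-side names for the inline code)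
def pvStep (s : Int) : Int := PySem.Int.band (s * 1664525 + 1013904223) 4294967295

def pvChar (t : Int) : Char :=
  PySem.List.pyGetD ['A', 'C', 'G', 'U'] (PySem.Int.band (t >>> (24 : Nat)) 3) 'A'

-- B's closed form for the k-th state (k : Nat), as a proof-side name
def pvState (s0 : Int) (k : Nat) : Int :=
  PySem.Int.mod (PySem.Int.mod (PySem.Int.powMod 1664525 k (1664524 * 4294967296)) 4294967296 * s0 +
    1013904223 * PySem.Int.floordiv (PySem.Int.powMod 1664525 k (1664524 * 4294967296) - 1) 1664524)
    4294967296

-- geometric sum ∑_{i<k} a^i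
def pvG (k : Nat) : Int := ∑ i ∈ Finset.range k, (1664525 : Int) ^ i

lemma pvG_mul (k : Nat) : 1664524 * pvG k = 1664525 ^ k - 1 := by
  have h := geom_sum_mul (1664525 : Int) k
  unfold pvG
  linarith [h]

lemma pvG_succ (k : Nat) : pvG (k + 1) = 1664525 * pvG k + 1 := by
  simpa [pvG] using geom_sum_succ (x := (1664525 : Int)) (n := k)

-- Python's  x & 0xFFFFFFFF  is  x mod 2^32, on every integer
lemma band_mask (x : Int) : PySem.Int.band x 4294967295 = x % 4294967296 := by
  by_cases hx : 0 ≤ x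
  · have h := Nat.and_two_pow_sub_one_eq_mod x.toNat 32
    simp only [show (2:Nat) ^ 32 = 4294967296 from rfl] at h
    rw [PySem.Int.band_of_nonneg hx (by norm_num),
      show (4294967295 : Int).toNat = 4294967295 from rfl, h]
    omega
  · have h := Nat.and_two_pow_sub_one_eq_mod (-x - 1).toNat 32
    simp only [show (2:Nat) ^ 32 = 4294967296 from rfl] at h
    unfold PySem.Int.band
    rw [if_neg hx, if_pos (by norm_num), show (4294967295 : Int).toNat = 4294967295 from rfl,
      Nat.land_comm, h]
    omega

lemma step_emod (s : Int) : pvStep s = (s * 1664525 + 1013904223) % 4294967296 := by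
  unfold pvStep; exact band_mask _

-- absorbing an inner reduction mod M
lemma emod_absorb (x a c M : Int) : ((x % M) * a + c) % M = (x * a + c) % M := by
  conv_lhs => rw [Int.add_emod, Int.mul_emod, Int.emod_emod_of_dvd x dvd_rfl]
  conv_rhs => rw [Int.add_emod, Int.mul_emod]

-- the exact geometric sum recovered from a^k mod ((a-1)·2^32)
lemma geo_emod (k : Nat) :
    PySem.Int.floordiv ((1664525 : Int) ^ k % (1664524 * 4294967296) - 1) 1664524 % 4294967296
      = pvG k % 4294967296 := by
  have hdef : (1664525 : Int) ^ k % (1664524 * 4294967296)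
      = 1664525 ^ k - 1664524 * 4294967296 * (1664525 ^ k / (1664524 * 4294967296)) := by
    rw [Int.emod_def]
  set q : Int := 1664525 ^ k / (1664524 * 4294967296) with hq
  have hfac : (1664525 : Int) ^ k % (1664524 * 4294967296) - 1
      = 1664524 * (pvG k - 4294967296 * q) := by
    have hg := pvG_mul k
    rw [hdef]; ring_nf; linarith [hg]
  rw [hfac, PySem.Int.floordiv_eq_ediv_of_pos (by norm_num),
    Int.mul_ediv_cancel_left _ (by norm_num)]
  omega

-- closed form of the (k+1)-st iterate of the LCG step
lemma iter_closed (s0 : Int) (k : Nat) :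
    pvStep^[k + 1] s0 = (1664525 ^ (k + 1) * s0 + 1013904223 * pvG (k + 1)) % 4294967296 := by
  induction k with
  | zero =>
    rw [Function.iterate_one, step_emod]
    have h1 : pvG 1 = 1 := by simp [pvG]
    rw [h1]; ring_nf
  | succ n ih =>
    rw [Function.iterate_succ_apply', ih, step_emod, emod_absorb, pvG_succ (n + 1)]
    ring_nf

-- B's closed form computes exactly the (k+1)-st iterate
lemma state_eq_iter (s0 : Int) (k : Nat) : pvState s0 (k + 1) = pvStep^[k + 1] s0 := by
  unfold pvState
  rw [PySem.Int.powMod_eq_emod _ _ (show (0:Int) < 1664524 * 4294967296 by norm_num)]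
  simp only [PySem.Int.mod_eq_emod_of_pos (show (0:Int) < 4294967296 by norm_num)]
  rw [Int.emod_emod_of_dvd _ (⟨1664524, by ring⟩ : (4294967296 : Int) ∣ 1664524 * 4294967296),
    iter_closed]
  conv_lhs => rw [Int.add_emod, Int.mul_emod, Int.emod_emod_of_dvd ((1664525:Int) ^ (k+1)) dvd_rfl,
    Int.mul_emod (1013904223 : Int), geo_emod]
  conv_rhs => rw [Int.add_emod, Int.mul_emod, Int.mul_emod (1013904223 : Int)]

-- B's per-element expression, as a proof-side name (defeq to the port's map body)
def pvAltCharI (s0 : Int) (k : Int) : Char :=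
  PySem.List.pyGetD ['A', 'C', 'G', 'U']
    (PySem.Int.band (pvState s0 (k + 1).toNat >>> (24 : Nat)) 3) 'A'

lemma altCharI_eq (s0 : Int) (k : Nat) : pvAltCharI s0 (k : Int) = pvChar (pvStep^[k + 1] s0) := by
  have hk : ((k : Int) + 1).toNat = k + 1 := by omega
  rw [pvAltCharI, hk, state_eq_iter, pvChar]

-- shape of A's loop: threaded state plus appended characters
lemma loopA (l : List Nat) (s : Int) (acc : List Char) :
    l.foldl (fun (st : Int × List Char) (_ : Nat) => (pvStep st.1, st.2 ++ [pvChar (pvStep st.1)])) (s, acc)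
      = (pvStep^[l.length] s,
         acc ++ (List.range l.length).map (fun k => pvChar (pvStep^[k + 1] s))) := by
  induction l generalizing s acc with
  | nil => simp
  | cons x xs ih =>
    simp only [List.foldl_cons, List.length_cons]
    rw [ih (pvStep s) (acc ++ [pvChar (pvStep s)])]
    rw [List.range_succ_eq_map]
    simp [Function.iterate_succ_apply, List.map_map, Function.comp_def, List.append_assoc]

lemma pyRange_negSucc (n : Nat) : PySem.List.pyRange 0 (Int.negSucc n) = [] := by
  simp [PySem.List.pyRange]

lemma main_ofNat (n : Nat) (seed : Int) :
    synthetic_sequence (Int.ofNat n) seed = synthetic_sequence_alt (Int.ofNat n) seed := by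
  show String.ofList (((PySem.List.pyRange 0 ((n : Nat) : Int)).foldl
      (fun (st : Int × List Char) (_ : Int) => (pvStep st.1, st.2 ++ [pvChar (pvStep st.1)]))
      (PySem.Int.bxor seed ((n : Nat) : Int), [])).2)
    = String.ofList ((PySem.List.pyRange 0 ((n : Nat) : Int)).map
        (pvAltCharI (PySem.Int.bxor seed ((n : Nat) : Int))))
  rw [PySem.List.pyRange_zero_natCast]
  simp only [List.foldl_map, List.map_map]
  rw [loopA, List.length_range]
  simp only [List.nil_append]
  simp only [Function.comp_def]
  exact congrArg String.ofList
    (List.map_congr_left fun k _ => (altCharI_eq (PySem.Int.bxor seed ((n : Nat) : Int)) k).symm)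

lemma main_negSucc (n : Nat) (seed : Int) :
    synthetic_sequence (Int.negSucc n) seed = synthetic_sequence_alt (Int.negSucc n) seed := by
  simp [synthetic_sequence, synthetic_sequence_alt, pyRange_negSucc]

-- ===== VERDICT (by name: the statement is the Claim_ definition above) =====
theorem synthetic_sequence_spec : Claim_equal_synthetic_sequence := by
  intro length seed _
  unfold Spec_synthetic_sequence
  cases length with
  | ofNat n => exact main_ofNat n seed
  | negSucc n => exact main_negSucc n seed
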